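-- pv_equiv track=rewrite | github.com/gosrak/fact0rn-miner-wapisnet | src/bitcoin.py | bitcoinaddress2hash160
-- ===== SOURCE A (Python) =====
-- def bitcoinaddress2hash160(addr):
--     table = "123456789ABCDEFGHJKLMNPQRSTUVWXYZabcdefghijkmnopqrstuvwxyz"
--
--     hash160 = 0
--     addr = addr[::-1]
--     for i, c in enumerate(addr):
--         hash160 += (58 ** i) * table.find(c)
--
--     hash160 = "{:050x}".format(hash160)
--
--     return hash160[2:50 - 8]
-- ===== SOURCE B (Python) =====
-- def bitcoinaddress2hash160(addr):
--     table = "123456789ABCDEFGHJKLMNPQRSTUVWXYZabcdefghijkmnopqrstuvwxyz"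
--     idx = {c: i for i, c in enumerate(table)}
--     h = 0
--     for c in addr:
--         h = h * 58 + idx.get(c, -1)
--     return format(h, '050x')[2:42]
-- ===== Notes on version B (the rewrite author's own statement) =====
-- stated objective: faster
-- what changed: Replaces the reversed-string enumerate loop that recomputes the bignum power 58**i and linearly scans the alphabet with table.find on every step by a single forward Horner pass h = h*58 + idx, with a precomputed char->index dict (find's -1 for foreign chars kept via .get default).
import Mathlib
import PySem

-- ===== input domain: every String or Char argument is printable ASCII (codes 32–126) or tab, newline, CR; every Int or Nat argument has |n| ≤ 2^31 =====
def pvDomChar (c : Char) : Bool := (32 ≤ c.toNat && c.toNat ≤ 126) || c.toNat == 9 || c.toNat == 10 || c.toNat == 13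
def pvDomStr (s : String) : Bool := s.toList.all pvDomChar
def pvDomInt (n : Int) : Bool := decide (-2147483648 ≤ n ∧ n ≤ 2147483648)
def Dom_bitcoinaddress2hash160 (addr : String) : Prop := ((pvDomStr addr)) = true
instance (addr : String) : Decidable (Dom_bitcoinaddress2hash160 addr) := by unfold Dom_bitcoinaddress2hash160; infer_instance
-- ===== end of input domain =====

-- B replaces A's reversed enumerate loop (58**i recomputed and table.find rescanned per char) by one
-- forward Horner pass with a precomputed char->index dict; same return value on every string.

-- ===== PORT A =====
-- "{:050x}".format(n): exact for any int — lowercase hex of |n|, zero-padded (sign first) to total width 50.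
def pyFormat050x (n : Int) : String :=
  if n < 0 then
    String.ofList ('-' :: (List.replicate (49 - (Nat.toDigits 16 n.natAbs).length) '0' ++ Nat.toDigits 16 n.natAbs))
  else
    String.ofList (List.replicate (50 - (Nat.toDigits 16 n.toNat).length) '0' ++ Nat.toDigits 16 n.toNat)

def bitcoinaddress2hash160 (addr : String) : String :=
  let table : String := "123456789ABCDEFGHJKLMNPQRSTUVWXYZabcdefghijkmnopqrstuvwxyz"
  -- addr = addr[::-1]
  let addr' : String := (PySem.Str.slice? addr none none (-1)).getD ""
  -- for i, c in enumerate(addr): hash160 += (58 ** i) * table.find(c)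
  let hash160 : Int :=
    (PySem.List.enumerate addr'.toList 0).foldl
      (fun h p => h + 58 ^ p.1.toNat * PySem.Str.find table (String.ofList [p.2])) 0
  -- hash160 = "{:050x}".format(hash160); return hash160[2:50 - 8]
  PySem.Str.slice (pyFormat050x hash160) (some 2) (some (50 - 8))

-- ===== PORT B =====
def bitcoinaddress2hash160_alt (addr : String) : String :=
  let table : String := "123456789ABCDEFGHJKLMNPQRSTUVWXYZabcdefghijkmnopqrstuvwxyz"
  -- idx = {c: i for i, c in enumerate(table)}
  let idx : PySem.Dict Char Int :=
    (PySem.List.enumerate table.toList 0).foldl (fun d p => d.insert p.2 p.1) PySem.Dict.empty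
  -- for c in addr: h = h * 58 + idx.get(c, -1)
  let h : Int := addr.toList.foldl (fun h c => h * 58 + idx.getD c (-1)) 0
  -- return format(h, '050x')[2:42]
  PySem.Str.slice (pyFormat050x h) (some 2) (some 42)

-- ===== PRECONDITION & SPEC =====
def Spec_bitcoinaddress2hash160 (addr : String) (out : String) : Prop := out = bitcoinaddress2hash160_alt addr
instance (addr : String) (out : String) : Decidable (Spec_bitcoinaddress2hash160 addr out) := by unfold Spec_bitcoinaddress2hash160; infer_instance

-- ===== CLAIM (what is proved, stated in full; the proofs are below) =====
def Claim_equal_bitcoinaddress2hash160 : Prop := ∀ (addr : String), Dom_bitcoinaddress2hash160 addr → Spec_bitcoinaddress2hash160 addr (bitcoinaddress2hash160 addr)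

-- ===== LEMMAS AND PROOFS =====

-- first index ≥ k of c in cs (as Python reports it), -1 if absent
def scanIdx (cs : List Char) (c : Char) (k : Nat) : Int :=
  match cs with
  | [] => -1
  | x :: xs => if x = c then (k : Int) else scanIdx xs c (k + 1)

lemma find_singleton (cs : List Char) (c : Char) (k : Nat) :
    PySem.Chars.find.go [c] cs k = scanIdx cs c k := by
  induction cs generalizing k with
  | nil => simp [PySem.Chars.find.go, scanIdx]
  | cons x xs ih =>
      simp only [PySem.Chars.find.go, scanIdx, List.isPrefixOf]
      by_cases h : x = c
      · simp [h]
      · have hb : (c == x) = false := beq_eq_false_iff_ne.mpr (Ne.symm h)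
        simp [hb, h, ih]

lemma scanIdx_not_mem (cs : List Char) (c : Char) (k : Nat) (h : c ∉ cs) :
    scanIdx cs c k = -1 := by
  induction cs generalizing k with
  | nil => rfl
  | cons x xs ih =>
      simp only [List.mem_cons, not_or] at h
      simp [scanIdx, Ne.symm h.1, ih (k + 1) h.2]

lemma dict_of_enumerate (cs : List Char) (hnd : cs.Nodup) (c : Char) :
    ∀ (k : Nat) (d : PySem.Dict Char Int),
      ((PySem.List.enumerate cs (k : Int)).foldl (fun d p => d.insert p.2 p.1) d).getD c (-1)
        = if c ∈ cs then scanIdx cs c k else d.getD c (-1) := by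
  induction cs with
  | nil => intro k d; simp [PySem.List.enumerate_nil]
  | cons x xs ih =>
      intro k d
      rcases List.nodup_cons.mp hnd with ⟨hx, hxs⟩
      have hcast : (k : Int) + 1 = ((k + 1 : Nat) : Int) := by push_cast; ring
      rw [PySem.List.enumerate_cons, List.foldl_cons, hcast, ih hxs (k + 1)]
      by_cases hm : c ∈ xs
      · have hne : c ≠ x := fun e => hx (e ▸ hm)
        simp [hm, scanIdx, Ne.symm hne]
      · rw [PySem.Dict.getD_insert]
        by_cases he : c = x
        · subst he; simp [hm, scanIdx]
        · simp [hm, he]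

def tableL : List Char := ['1', '2', '3', '4', '5', '6', '7', '8', '9', 'A', 'B', 'C', 'D', 'E', 'F', 'G', 'H', 'J', 'K', 'L', 'M', 'N', 'P', 'Q', 'R', 'S', 'T', 'U', 'V', 'W', 'X', 'Y', 'Z', 'a', 'b', 'c', 'd', 'e', 'f', 'g', 'h', 'i', 'j', 'k', 'm', 'n', 'o', 'p', 'q', 'r', 's', 't', 'u', 'v', 'w', 'x', 'y', 'z']

-- the dict lookup in B equals the table.find in A, for every char
lemma idx_eq_find (c : Char) :
    (((PySem.List.enumerate tableL 0).foldl (fun d p => d.insert p.2 p.1)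
        PySem.Dict.empty).getD c (-1))
      = PySem.Chars.find tableL [c] := by
  have hnd : tableL.Nodup := by decide
  have h0 : ((0 : Nat) : Int) = (0 : Int) := rfl
  rw [PySem.Chars.find, find_singleton, ← h0, dict_of_enumerate tableL hnd c 0]
  by_cases hm : c ∈ tableL
  · simp [hm]
  · simp [hm, PySem.Dict.getD_empty, scanIdx_not_mem tableL c 0 hm]

-- Horner with an accumulator is linear in the accumulator
lemma horner_acc (f : Char → Int) (l : List Char) :
    ∀ (a : Int), l.foldl (fun h c => h * 58 + f c) a
      = a * 58 ^ l.length + l.foldl (fun h c => h * 58 + f c) 0 := by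
  induction l with
  | nil => intro a; simp
  | cons x xs ih =>
      intro a
      simp only [List.foldl_cons, List.length_cons]
      rw [ih (a * 58 + f x), ih (0 * 58 + f x)]
      ring

-- A's positional-power sum over the reversed list equals B's forward Horner fold
lemma sum_eq_horner (f : Char → Int) (l : List Char) :
    (PySem.List.enumerate l.reverse 0).foldl (fun h p => h + 58 ^ p.1.toNat * f p.2) 0
      = l.foldl (fun h c => h * 58 + f c) 0 := by
  induction l with
  | nil => simp [PySem.List.enumerate_nil]
  | cons x xs ih =>
      have hlen : (PySem.List.enumerate xs.reverse 0).foldl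
          (fun h p => h + 58 ^ p.1.toNat * f p.2) 0
          = xs.foldl (fun h c => h * 58 + f c) 0 := ih
      rw [List.reverse_cons, PySem.List.enumerate_append, List.foldl_append, hlen]
      simp only [PySem.List.enumerate_cons, PySem.List.enumerate_nil, List.foldl_cons,
        List.foldl_nil, List.length_reverse]
      rw [horner_acc f xs (0 * 58 + f x)]
      have hn : ((0 : Int) + (xs.length : Int)).toNat = xs.length := by simp
      rw [hn]
      ring

-- ===== VERDICT (by name: the statement is the Claim_ definition above) =====
theorem bitcoinaddress2hash160_spec : Claim_equal_bitcoinaddress2hash160 := by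
  intro addr _
  show bitcoinaddress2hash160 addr = bitcoinaddress2hash160_alt addr
  unfold bitcoinaddress2hash160 bitcoinaddress2hash160_alt
  rw [PySem.Str.slice?_none_none_neg_one]
  simp only [Option.getD_some, String.toList_ofList]
  have ht : ("123456789ABCDEFGHJKLMNPQRSTUVWXYZabcdefghijkmnopqrstuvwxyz" : String).toList
      = tableL := by decide
  have hfind : ∀ c : Char,
      PySem.Str.find "123456789ABCDEFGHJKLMNPQRSTUVWXYZabcdefghijkmnopqrstuvwxyz"
        (String.ofList [c]) = PySem.Chars.find tableL [c] := by
    intro c; simp only [PySem.Str.find_eq, String.toList_ofList, ht]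
  have hidx : ∀ c : Char,
      (((PySem.List.enumerate
          ("123456789ABCDEFGHJKLMNPQRSTUVWXYZabcdefghijkmnopqrstuvwxyz" : String).toList 0).foldl
          (fun d p => d.insert p.2 p.1) PySem.Dict.empty).getD c (-1))
        = PySem.Chars.find tableL [c] := by
    intro c; rw [ht]; exact idx_eq_find c
  simp only [hfind, hidx]
  rw [sum_eq_horner (fun c => PySem.Chars.find tableL [c]) addr.toList]
  norm_num
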